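-- pv_equiv track=rewrite | github.com/angyettii/jellySplashTP | shuffle.py | solExists
-- ===== SOURCE A (Python) =====
-- def solExists(board):
--     for row in range(len(board)):
--             for col in range(len(board[0])):
--                 sol = []
--                 if solExistsHelper(board, row, col, sol) == True and board[row][col] != None:
--                      return True
--                 else:
--                      continue
--     return False
--
-- def solExistsHelper(board, row, col, sol):
--
--     if len(sol) >= 3:
--         return True
--
--     else:
--         for nextRow in range(row-1, row+2):
--             for nextCol in range(col-1, col+2):
--                  if isValid(board, row, col, nextRow, nextCol, sol):
--                     sol.append((nextRow, nextCol))
--                     solution = solExistsHelper(board, nextRow, nextCol, sol)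
--                     if solution != False:
--                         return True
--                     sol.pop()
--         return False
--
-- def isValid(board, row, col, nextRow, nextCol, sol):
--     #in dimensions of the board and the same thing as the previous thing
--     #not in sol already
--
--     if (((nextRow, nextCol) != (row, col)) and
--         (nextRow>=0) and (nextRow < len(board)) and
--         (nextCol>=0) and (nextCol < len(board[0])) and
--         (board[nextRow][nextCol]==board[row][col])and
--         ((nextRow, nextCol) not in sol)):
--         return True
-- ===== SOURCE B (Python) =====
-- def solExists(board):
--     # Single local scan: a length-4 equal-valued walk (A's search, which may
--     # revisit its start cell) exists iff some non-None cell has at least two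
--     # distinct equal-valued 8-neighbors (walk b,a,b,c).
--     if not board:
--         return False
--     height = len(board)
--     width = len(board[0])
--     for r in range(height):
--         for c in range(width):
--             v = board[r][c]
--             if v is None:
--                 continue
--             count = 0
--             for dr in (-1, 0, 1):
--                 for dc in (-1, 0, 1):
--                     if (dr, dc) != (0, 0):
--                         nr, nc = r + dr, c + dc
--                         if 0 <= nr < height and 0 <= nc < width and board[nr][nc] == v:
--                             count += 1
--             if count >= 2:
--                 return True
--     return False
-- ===== Notes on version B (the rewrite author's own statement) =====
-- stated objective: simpler
-- what changed: Replaces the recursive backtracking search for a length-4 equal-valued walk (which may revisit its start cell) by a single local scan: return True iff some non-None cell has two distinct equal-valued in-bounds 8-neighbors.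
-- outside the precondition, e.g. on solExists([[1, 1], [1]]): A returns True, B raises IndexError
import Mathlib
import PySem

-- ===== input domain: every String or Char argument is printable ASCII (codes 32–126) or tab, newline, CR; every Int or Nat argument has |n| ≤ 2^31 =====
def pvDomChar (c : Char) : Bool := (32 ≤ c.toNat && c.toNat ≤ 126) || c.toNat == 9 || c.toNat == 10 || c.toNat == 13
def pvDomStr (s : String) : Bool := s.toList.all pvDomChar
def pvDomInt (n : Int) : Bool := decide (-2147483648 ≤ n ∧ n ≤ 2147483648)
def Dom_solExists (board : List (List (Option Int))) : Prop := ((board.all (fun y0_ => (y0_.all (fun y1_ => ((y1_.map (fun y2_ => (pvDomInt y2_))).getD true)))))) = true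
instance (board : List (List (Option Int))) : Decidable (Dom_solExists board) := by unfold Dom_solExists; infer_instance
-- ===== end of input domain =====

-- B replaces A's recursive backtracking walk search by a single local scan
-- (a cell with two distinct equal 8-neighbors), objective: simpler.

-- shared indexing helper: board[r][c], defaulting to none (both ports only
-- index after the same bounds checks their Pythons perform; inside Pre_ every
-- performed access is in range, so the default is never the returned cell)
def pvCell (board : List (List (Option Int))) (r c : Int) : Option Int :=
  PySem.List.pyGetD (PySem.List.pyGetD board r []) c none

-- ===== PORT A =====
def pvIsValid (board : List (List (Option Int))) (row col nextRow nextCol : Int)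
    (sol : List (Int × Int)) : Bool :=
  ((nextRow, nextCol) != (row, col)) &&
  decide (0 ≤ nextRow) && decide (nextRow < (board.length : Int)) &&
  decide (0 ≤ nextCol) && decide (nextCol < ((PySem.List.pyGetD board 0 []).length : Int)) &&
  (pvCell board nextRow nextCol == pvCell board row col) &&
  !(sol.contains (nextRow, nextCol))

-- fuel only makes the recursion structural: sol grows by one per call and the
-- len(sol) >= 3 test stops it, so fuel 4 (as called below) is never exhausted
def pvHelper (board : List (List (Option Int))) (fuel : Nat) (row col : Int)
    (sol : List (Int × Int)) : Bool :=
  match fuel with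
  | 0 => false
  | f + 1 =>
    if 3 ≤ sol.length then true
    else
      (PySem.List.pyRange (row - 1) (row + 2) 1).any fun nextRow =>
        (PySem.List.pyRange (col - 1) (col + 2) 1).any fun nextCol =>
          pvIsValid board row col nextRow nextCol sol &&
          pvHelper board f nextRow nextCol (sol ++ [(nextRow, nextCol)])

def solExists (board : List (List (Option Int))) : Bool :=
  (PySem.List.pyRange 0 (board.length : Int) 1).any fun row =>
    (PySem.List.pyRange 0 ((PySem.List.pyGetD board 0 []).length : Int) 1).any fun col =>
      pvHelper board 4 row col [] && (pvCell board row col != none)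

-- ===== PORT B =====
def pvOffsets : List (Int × Int) :=
  [(-1, -1), (-1, 0), (-1, 1), (0, -1), (0, 0), (0, 1), (1, -1), (1, 0), (1, 1)]

-- the condition of Source B's inner counting loop, as a named predicate
def pvNbrOK (board : List (List (Option Int))) (r c : Int) (v : Option Int)
    (d : Int × Int) : Bool :=
  (d != ((0 : Int), (0 : Int))) &&
  decide (0 ≤ r + d.1) && decide (r + d.1 < (board.length : Int)) &&
  decide (0 ≤ c + d.2) && decide (c + d.2 < ((PySem.List.pyGetD board 0 []).length : Int)) &&
  (pvCell board (r + d.1) (c + d.2) == v)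

def solExists_alt (board : List (List (Option Int))) : Bool :=
  if board.isEmpty then false
  else
    (PySem.List.pyRange 0 (board.length : Int) 1).any fun r =>
      (PySem.List.pyRange 0 ((PySem.List.pyGetD board 0 []).length : Int) 1).any fun c =>
        let v := pvCell board r c
        if v = none then false
        else decide (2 ≤ pvOffsets.countP (pvNbrOK board r c v))

-- ===== PRECONDITION & SPEC =====
-- Pre_ excludes ragged boards with a row shorter than row 0: there both
-- Pythons index a missing cell and raise IndexError (A sometimes returns
-- early before touching one; B then still raises).
def Pre_solExists (board : List (List (Option Int))) : Prop :=
  ∀ row ∈ board, (PySem.List.pyGetD board 0 []).length ≤ row.length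
instance (board : List (List (Option Int))) : Decidable (Pre_solExists board) := by
  unfold Pre_solExists; infer_instance

def pvWitness_solExists : List (List (Option Int)) :=
  [[some 1, some 1], [some 1, some 2]]

def Spec_solExists (board : List (List (Option Int))) (out : Bool) : Prop := out = solExists_alt board
instance (board : List (List (Option Int))) (out : Bool) : Decidable (Spec_solExists board out) := by
  unfold Spec_solExists; infer_instance

-- ===== CLAIM (what is proved, stated in full; the proofs are below) =====
def Claim_equal_solExists : Prop := ∀ (board : List (List (Option Int))), Dom_solExists board → Pre_solExists board → Spec_solExists board (solExists board)


-- ===== LEMMAS AND PROOFS =====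

-- A's isValid, spelt out
lemma isValid_iff (board : List (List (Option Int))) (row col nr nc : Int) (sol : List (Int × Int)) :
    pvIsValid board row col nr nc sol = true ↔
    (nr, nc) ≠ (row, col) ∧ 0 ≤ nr ∧ nr < (board.length : Int) ∧
    0 ≤ nc ∧ nc < ((PySem.List.pyGetD board 0 []).length : Int) ∧
    pvCell board nr nc = pvCell board row col ∧ (nr, nc) ∉ sol := by
  simp [pvIsValid, and_assoc]

-- one unfolding of A's backtracking helper
lemma helper_succ_iff (board : List (List (Option Int))) (f : Nat) (row col : Int)
    (sol : List (Int × Int)) (h : sol.length < 3) :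
    pvHelper board (f + 1) row col sol = true ↔
    ∃ q : Int × Int, row - 1 ≤ q.1 ∧ q.1 < row + 2 ∧ col - 1 ≤ q.2 ∧ q.2 < col + 2 ∧
      pvIsValid board row col q.1 q.2 sol = true ∧
      pvHelper board f q.1 q.2 (sol ++ [q]) = true := by
  rw [pvHelper]
  rw [if_neg (Nat.not_le.mpr h)]
  simp only [List.any_eq_true, PySem.List.mem_pyRange_one, Bool.and_eq_true]
  constructor
  · rintro ⟨nr, ⟨h1, h2⟩, nc, ⟨h3, h4⟩, h5, h6⟩
    exact ⟨(nr, nc), h1, h2, h3, h4, h5, h6⟩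
  · rintro ⟨⟨nr, nc⟩, h1, h2, h3, h4, h5, h6⟩
    exact ⟨nr, ⟨h1, h2⟩, nc, ⟨h3, h4⟩, h5, h6⟩

lemma helper_base (board : List (List (Option Int))) (f : Nat) (row col : Int)
    (sol : List (Int × Int)) (h : 3 ≤ sol.length) :
    pvHelper board (f + 1) row col sol = true := by
  rw [pvHelper]; simp [h]

-- one step of A's walk: q is a new in-bounds equal-valued cell in p's 3x3 window
def pvStep (board : List (List (Option Int))) (p q : Int × Int) : Prop :=
  q ≠ p ∧ 0 ≤ q.1 ∧ q.1 < (board.length : Int) ∧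
  0 ≤ q.2 ∧ q.2 < ((PySem.List.pyGetD board 0 []).length : Int) ∧
  pvCell board q.1 q.2 = pvCell board p.1 p.2 ∧
  p.1 - 1 ≤ q.1 ∧ q.1 < p.1 + 2 ∧ p.2 - 1 ≤ q.2 ∧ q.2 < p.2 + 2

-- A's helper from an empty sol finds exactly a 3-step walk avoiding earlier sol cells
lemma helper4_iff (board : List (List (Option Int))) (s : Int × Int) :
    pvHelper board 4 s.1 s.2 [] = true ↔
    ∃ x1 x2 x3 : Int × Int, pvStep board s x1 ∧ pvStep board x1 x2 ∧ pvStep board x2 x3 ∧ x3 ≠ x1 := by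
  rw [show (4 : Nat) = 3 + 1 from rfl, helper_succ_iff _ _ _ _ _ (by simp)]
  constructor
  · rintro ⟨x1, a1, a2, a3, a4, hv1, hrec⟩
    rw [show (3 : Nat) = 2 + 1 from rfl, helper_succ_iff _ _ _ _ _ (by simp)] at hrec
    obtain ⟨x2, b1, b2, b3, b4, hv2, hrec⟩ := hrec
    rw [show (2 : Nat) = 1 + 1 from rfl, helper_succ_iff _ _ _ _ _ (by simp)] at hrec
    obtain ⟨x3, c1, c2, c3, c4, hv3, _⟩ := hrec
    rw [isValid_iff] at hv1 hv2 hv3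
    obtain ⟨d1, d2, d3, d4, d5, d6, _⟩ := hv1
    obtain ⟨e1, e2, e3, e4, e5, e6, e7⟩ := hv2
    obtain ⟨f1, f2, f3, f4, f5, f6, f7⟩ := hv3
    simp at f7
    refine ⟨x1, x2, x3, ?_, ?_, ?_, ?_⟩
    · exact ⟨by simpa using d1, d2, d3, d4, d5, by simpa using d6, a1, a2, a3, a4⟩
    · exact ⟨by simpa using e1, e2, e3, e4, e5, by simpa using e6, b1, b2, b3, b4⟩
    · exact ⟨by simpa using f1, f2, f3, f4, f5, by simpa using f6, c1, c2, c3, c4⟩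
    · simpa using f7.1
  · rintro ⟨x1, x2, x3, ⟨d1, d2, d3, d4, d5, d6, a1, a2, a3, a4⟩,
      ⟨e1, e2, e3, e4, e5, e6, b1, b2, b3, b4⟩, ⟨f1, f2, f3, f4, f5, f6, c1, c2, c3, c4⟩, hne⟩
    refine ⟨x1, a1, a2, a3, a4, ?_, ?_⟩
    · rw [isValid_iff]
      exact ⟨by simpa using d1, d2, d3, d4, d5, by simpa using d6, by simp⟩
    · rw [show (3 : Nat) = 2 + 1 from rfl, helper_succ_iff _ _ _ _ _ (by simp)]
      refine ⟨x2, b1, b2, b3, b4, ?_, ?_⟩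
      · rw [isValid_iff]
        refine ⟨by simpa using e1, e2, e3, e4, e5, by simpa using e6, ?_⟩
        simpa using e1
      · rw [show (2 : Nat) = 1 + 1 from rfl, helper_succ_iff _ _ _ _ _ (by simp)]
        refine ⟨x3, c1, c2, c3, c4, ?_, ?_⟩
        · rw [isValid_iff]
          refine ⟨by simpa using f1, f2, f3, f4, f5, by simpa using f6, ?_⟩
          intro hmem
          simp at hmem
          rcases hmem with h | h
          · exact hne (by simpa using h)
          · exact (by simpa using f1 : x3 ≠ x2) (by simpa using h)
        · exact helper_base _ _ _ _ _ (by simp)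


lemma A_iff (board : List (List (Option Int))) :
    solExists board = true ↔
    ∃ s : Int × Int, (0 ≤ s.1 ∧ s.1 < (board.length : Int)) ∧
      (0 ≤ s.2 ∧ s.2 < ((PySem.List.pyGetD board 0 []).length : Int)) ∧
      pvHelper board 4 s.1 s.2 [] = true ∧ pvCell board s.1 s.2 ≠ none := by
  simp only [solExists, List.any_eq_true, PySem.List.mem_pyRange_one, Bool.and_eq_true,
    bne_iff_ne, ne_eq]
  constructor
  · rintro ⟨r, ⟨h1, h2⟩, c, ⟨h3, h4⟩, h5, h6⟩
    exact ⟨(r, c), ⟨h1, h2⟩, ⟨h3, h4⟩, h5, h6⟩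
  · rintro ⟨⟨r, c⟩, ⟨h1, h2⟩, ⟨h3, h4⟩, h5, h6⟩
    exact ⟨r, ⟨h1, h2⟩, c, ⟨h3, h4⟩, h5, h6⟩


lemma alt_iff (board : List (List (Option Int))) :
    solExists_alt board = true ↔
    ∃ r c : Int, (0 ≤ r ∧ r < (board.length : Int)) ∧
      (0 ≤ c ∧ c < ((PySem.List.pyGetD board 0 []).length : Int)) ∧
      pvCell board r c ≠ none ∧ 2 ≤ pvOffsets.countP (pvNbrOK board r c (pvCell board r c)) := by
  by_cases hb : board.isEmpty
  · have : board = [] := List.isEmpty_iff.mp hb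
    subst this
    simp [solExists_alt]
  · rw [solExists_alt, if_neg hb]
    simp only [List.any_eq_true, PySem.List.mem_pyRange_one]
    constructor
    · rintro ⟨r, ⟨h1, h2⟩, c, ⟨h3, h4⟩, h5⟩
      by_cases hv : pvCell board r c = none
      · simp [hv] at h5
      · simp only [hv, if_false, decide_eq_true_eq] at h5
        exact ⟨r, c, ⟨h1, h2⟩, ⟨h3, h4⟩, hv, h5⟩
    · rintro ⟨r, c, ⟨h1, h2⟩, ⟨h3, h4⟩, hv, h5⟩
      refine ⟨r, ⟨h1, h2⟩, c, ⟨h3, h4⟩, ?_⟩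
      simp only [hv, if_false, decide_eq_true_eq]
      exact h5


lemma two_le_countP_iff {α : Type} [DecidableEq α] {l : List α} (hl : l.Nodup) (p : α → Bool) :
    2 ≤ l.countP p ↔ ∃ a ∈ l, ∃ b ∈ l, a ≠ b ∧ p a = true ∧ p b = true := by
  rw [List.countP_eq_length_filter]
  constructor
  · intro h
    have hnd : (l.filter p).Nodup := hl.filter p
    match hf : l.filter p with
    | [] => rw [hf] at h; simp at h
    | [a] => rw [hf] at h; simp at h
    | a :: b :: t =>
      rw [hf] at hnd
      have ha : a ∈ l.filter p := by rw [hf]; simp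
      have hb : b ∈ l.filter p := by rw [hf]; simp
      have hab : a ≠ b := by
        intro e; subst e; simp at hnd
      rw [List.mem_filter] at ha hb
      exact ⟨a, ha.1, b, hb.1, hab, ha.2, hb.2⟩
  · rintro ⟨a, ha, b, hb, hab, hpa, hpb⟩
    have hsub : ({a, b} : Finset α) ⊆ (l.filter p).toFinset := by
      intro x hx
      simp only [Finset.mem_insert, Finset.mem_singleton] at hx
      rcases hx with rfl | rfl <;> simp [*]
    have h2 : ({a, b} : Finset α).card = 2 := Finset.card_pair hab
    calc 2 = ({a, b} : Finset α).card := h2.symm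
      _ ≤ (l.filter p).toFinset.card := Finset.card_le_card hsub
      _ ≤ (l.filter p).length := (l.filter p).toFinset_card_le


lemma mem_pvOffsets (d : Int × Int) (h1 : -1 ≤ d.1) (h2 : d.1 ≤ 1) (h3 : -1 ≤ d.2) (h4 : d.2 ≤ 1) :
    d ∈ pvOffsets := by
  obtain ⟨a, b⟩ := d
  simp only at h1 h2 h3 h4
  interval_cases a <;> interval_cases b <;> simp [pvOffsets]

lemma pvOffsets_bounds (d : Int × Int) (h : d ∈ pvOffsets) :
    -1 ≤ d.1 ∧ d.1 ≤ 1 ∧ -1 ≤ d.2 ∧ d.2 ≤ 1 := by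
  fin_cases h <;> norm_num

lemma pvNbrOK_iff (board : List (List (Option Int))) (r c : Int) (v : Option Int) (d : Int × Int) :
    pvNbrOK board r c v d = true ↔
    d ≠ (0, 0) ∧ 0 ≤ r + d.1 ∧ r + d.1 < (board.length : Int) ∧
    0 ≤ c + d.2 ∧ c + d.2 < ((PySem.List.pyGetD board 0 []).length : Int) ∧
    pvCell board (r + d.1) (c + d.2) = v := by
  simp [pvNbrOK, and_assoc]

lemma pvOffsets_nodup : pvOffsets.Nodup := by decide

lemma pair_ne_iff (p q : Int × Int) : p ≠ q ↔ (p.1 ≠ q.1 ∨ p.2 ≠ q.2) := by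
  rw [Ne, Prod.ext_iff, not_and_or]

lemma main_iff (board : List (List (Option Int))) :
    solExists board = solExists_alt board := by
  rw [Bool.eq_iff_iff, A_iff, alt_iff]
  constructor
  · rintro ⟨s, hs1, hs2, hh, hne⟩
    rw [helper4_iff] at hh
    obtain ⟨x1, x2, x3, ⟨d1, d2, d3, d4, d5, d6, a1, a2, a3, a4⟩,
      ⟨e1, e2, e3, e4, e5, e6, b1, b2, b3, b4⟩,
      ⟨f1, f2, f3, f4, f5, f6, c1, c2, c3, c4⟩, hne31⟩ := hh
    refine ⟨x2.1, x2.2, ⟨e2, e3⟩, ⟨e4, e5⟩, ?_, ?_⟩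
    · rw [e6, d6]; exact hne
    · apply (two_le_countP_iff pvOffsets_nodup _).mpr
      refine ⟨(x1.1 - x2.1, x1.2 - x2.2), ?_, (x3.1 - x2.1, x3.2 - x2.2), ?_, ?_, ?_, ?_⟩
      · exact mem_pvOffsets _ (by simp; omega) (by simp; omega) (by simp; omega) (by simp; omega)
      · exact mem_pvOffsets _ (by simp; omega) (by simp; omega) (by simp; omega) (by simp; omega)
      · rw [pair_ne_iff] at hne31 ⊢
        dsimp only at *
        omega
      · rw [pvNbrOK_iff]
        rw [pair_ne_iff] at e1 ⊢
        dsimp only at e1 ⊢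
        have h1 : x2.1 + (x1.1 - x2.1) = x1.1 := by ring
        have h2 : x2.2 + (x1.2 - x2.2) = x1.2 := by ring
        refine ⟨by omega, by omega, by omega, by omega, by omega, ?_⟩
        rw [h1, h2]; exact e6.symm
      · rw [pvNbrOK_iff]
        rw [pair_ne_iff] at f1 ⊢
        dsimp only at f1 ⊢
        have h1 : x2.1 + (x3.1 - x2.1) = x3.1 := by ring
        have h2 : x2.2 + (x3.2 - x2.2) = x3.2 := by ring
        refine ⟨by omega, by omega, by omega, by omega, by omega, ?_⟩
        rw [h1, h2]; exact f6
  · rintro ⟨r, c, hr, hc, hv, hcnt⟩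
    obtain ⟨a, ha, b, hb, hab, hpa, hpb⟩ := (two_le_countP_iff pvOffsets_nodup _).mp hcnt
    rw [pvNbrOK_iff] at hpa hpb
    obtain ⟨a0, a1, a2, a3, a4, a5⟩ := hpa
    obtain ⟨b0, b1, b2, b3, b4, b5⟩ := hpb
    obtain ⟨haL, haR, haL2, haR2⟩ := pvOffsets_bounds a ha
    obtain ⟨hbL, hbR, hbL2, hbR2⟩ := pvOffsets_bounds b hb
    rw [pair_ne_iff] at a0 b0 hab
    dsimp only at a0 b0
    refine ⟨(r, c), hr, hc, ?_, hv⟩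
    rw [helper4_iff]
    refine ⟨(r + a.1, c + a.2), (r, c), (r + b.1, c + b.2), ?_, ?_, ?_, ?_⟩
    · refine ⟨?_, a1, a2, a3, a4, a5, by simp; omega, by simp; omega, by simp; omega, by simp; omega⟩
      rw [pair_ne_iff]; dsimp only; omega
    · refine ⟨?_, hr.1, hr.2, hc.1, hc.2, a5.symm, by simp; omega, by simp; omega, by simp; omega, by simp; omega⟩
      rw [pair_ne_iff]; dsimp only; omega
    · refine ⟨?_, b1, b2, b3, b4, b5, by simp; omega, by simp; omega, by simp; omega, by simp; omega⟩
      rw [pair_ne_iff]; dsimp only; omega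
    · rw [pair_ne_iff]; dsimp only; omega


-- ===== VERDICT (by name: the statement is the Claim_ definition above) =====
theorem solExists_spec : Claim_equal_solExists := by
  intro board _ _
  unfold Spec_solExists
  exact main_iff board
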